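-- pv_equiv track=rewrite | github.com/bennygiardina/tabellone_via_url | update_indian_wells_matches_csv_no_pdf.py | smart_title_token
-- ===== SOURCE A (Python) =====
-- LOWERCASE_PARTICLES = {
--     "de", "del", "della", "di", "da", "dos", "das",
--     "van", "von", "der", "den", "la", "le",
-- }
--
-- def smart_title_token(token: str) -> str:
--     token = token.strip()
--     if not token:
--         return token
--     if "-" in token:
--         return "-".join(smart_title_token(part) for part in token.split("-"))
--     if "'" in token:
--         return "'".join(smart_title_token(part) for part in token.split("'"))
--     lower = token.lower()
--     if lower in LOWERCASE_PARTICLES: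
--         return lower
--     if lower.startswith("mc") and len(token) > 2:
--         return "Mc" + token[2:3].upper() + token[3:].lower()
--     return token[:1].upper() + token[1:].lower()
-- ===== SOURCE B (Python) =====
-- LOWERCASE_PARTICLES = {
--     "de", "del", "della", "di", "da", "dos", "das",
--     "van", "von", "der", "den", "la", "le",
-- }
--
--
-- def _core(seg: str) -> str:
--     seg = seg.strip()
--     if not seg:
--         return seg
--     lower = seg.lower()
--     if lower in LOWERCASE_PARTICLES:
--         return lower
--     if lower.startswith("mc") and len(seg) > 2:
--         return "Mc" + seg[2:3].upper() + seg[3:].lower()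
--     return seg[:1].upper() + seg[1:].lower()
--
--
-- def smart_title_token(token: str) -> str:
--     out = []
--     cur = []
--     for ch in token:
--         if ch in "-'":
--             out.append(_core("".join(cur)))
--             out.append(ch)
--             cur = []
--         else:
--             cur.append(ch)
--     out.append(_core("".join(cur)))
--     return "".join(out)
-- ===== Notes on version B (the rewrite author's own statement) =====
-- stated objective: alternative
-- what changed: Replaced A's two-level recursive split/join on '-' then ' with a single left-to-right pass that buffers characters, emits each delimiter verbatim and applies one flat core transform (strip, particle, Mc, title) to every buffered segment.
import Mathlib
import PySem

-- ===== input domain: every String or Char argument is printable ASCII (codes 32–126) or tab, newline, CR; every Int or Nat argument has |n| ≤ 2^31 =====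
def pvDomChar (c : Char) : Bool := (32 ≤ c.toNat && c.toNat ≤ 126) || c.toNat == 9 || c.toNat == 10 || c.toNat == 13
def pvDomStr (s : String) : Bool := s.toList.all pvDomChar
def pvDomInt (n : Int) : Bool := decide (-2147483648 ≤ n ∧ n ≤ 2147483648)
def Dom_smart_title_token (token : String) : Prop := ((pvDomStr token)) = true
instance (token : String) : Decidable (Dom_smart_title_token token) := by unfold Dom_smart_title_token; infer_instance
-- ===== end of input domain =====

-- B re-implements A's two-level recursive split/join on '-' and ' as one flat left-to-right
-- pass with a buffer, applying a single core transform to each buffered segment (objective: alternative).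

-- ===== PORT A =====
-- helpers used by port A's termination argument (cited in decreasing_by):
-- pvSplitD d l = Python l.split(d) for a single-character separator (reference shape of PySem.Chars.splitOn).
def pvConsFirst (x : List Char) : List (List Char) → List (List Char)
  | [] => [x]
  | p :: ps => (x ++ p) :: ps

def pvSplitD (d : Char) : List Char → List (List Char)
  | [] => [[]]
  | c :: r => if c = d then [] :: pvSplitD d r else pvConsFirst [c] (pvSplitD d r)

theorem pvSplitD_ne_nil (d : Char) (l : List Char) : pvSplitD d l ≠ [] := by
  induction l with
  | nil => simp [pvSplitD]
  | cons c r ih =>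
    simp only [pvSplitD]
    split
    · simp
    · cases h : pvSplitD d r with
      | nil => exact absurd h ih
      | cons p ps => simp [pvConsFirst]

theorem pvSplitOn_go_eq (d : Char) (fuel : Nat) (l cur : List Char) (acc : List (List Char))
    (h : l.length < fuel) :
    PySem.Chars.splitOn.go [d] fuel l cur acc =
      acc.reverse ++ pvConsFirst cur.reverse (pvSplitD d l) := by
  induction fuel generalizing l cur acc with
  | zero => omega
  | succ f ih =>
    cases l with
    | nil =>
      simp [PySem.Chars.splitOn.go, pvSplitD, pvConsFirst]
    | cons c rest =>
      simp only [PySem.Chars.splitOn.go]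
      by_cases hc : c = d
      · have hpre : [d].isPrefixOf (c :: rest) = true := by simp [List.isPrefixOf, hc]
        rw [if_pos hpre]
        rw [ih _ _ _ (by simpa using Nat.lt_of_succ_lt_succ h)]
        simp only [pvSplitD, if_pos hc, List.length_cons, List.drop_succ_cons,
          List.drop_zero, List.reverse_nil]
        cases hs : pvSplitD d rest with
        | nil => exact absurd hs (pvSplitD_ne_nil d rest)
        | cons p ps => simp [hs, pvConsFirst]
      · have hpre : [d].isPrefixOf (c :: rest) = false := by
          simp [List.isPrefixOf]
          exact fun hh => absurd hh.symm hc
        rw [if_neg (by simp [hpre])]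
        rw [ih _ _ _ (by simpa using Nat.lt_of_succ_lt_succ h)]
        simp only [pvSplitD, if_neg hc]
        cases hs : pvSplitD d rest with
        | nil => exact absurd hs (pvSplitD_ne_nil d rest)
        | cons p ps => simp [pvConsFirst]

theorem pvSplitOn_eq_splitD (d : Char) (l : List Char) :
    PySem.Chars.splitOn l [d] = pvSplitD d l := by
  have := pvSplitOn_go_eq d (l.length + 1) l [] [] (by omega)
  simp only [PySem.Chars.splitOn] at *
  rw [this]
  cases hs : pvSplitD d l with
  | nil => exact absurd hs (pvSplitD_ne_nil d l)
  | cons p ps => simp [pvConsFirst]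

theorem pvLength_le_of_mem_splitD (d : Char) (l p : List Char) (hp : p ∈ pvSplitD d l) :
    p.length ≤ l.length := by
  induction l generalizing p with
  | nil => simp [pvSplitD] at hp; simp [hp]
  | cons c r ih =>
    simp only [pvSplitD] at hp
    split at hp
    · rcases List.mem_cons.1 hp with h | h
      · simp [h]
      · exact Nat.le_succ_of_le (ih p h)
    · cases hs : pvSplitD d r with
      | nil => exact absurd hs (pvSplitD_ne_nil d r)
      | cons q qs =>
        rw [hs] at hp
        simp only [pvConsFirst] at hp
        rcases List.mem_cons.1 hp with h | h
        · subst h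
          have : q.length ≤ r.length := ih q (by rw [hs]; exact List.mem_cons_self ..)
          simpa using this
        · exact Nat.le_succ_of_le (ih p (by rw [hs]; exact List.mem_cons_of_mem _ h))

theorem pvLength_lt_of_mem_splitD (d : Char) (l p : List Char) (hd : d ∈ l)
    (hp : p ∈ pvSplitD d l) : p.length < l.length := by
  induction l generalizing p with
  | nil => simp at hd
  | cons c r ih =>
    simp only [pvSplitD] at hp
    by_cases hc : c = d
    · rw [if_pos hc] at hp
      rcases List.mem_cons.1 hp with h | h
      · simp [h]
      · exact Nat.lt_succ_of_le (pvLength_le_of_mem_splitD d r p h)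
    · rw [if_neg hc] at hp
      have hdr : d ∈ r := by
        rcases List.mem_cons.1 hd with h | h
        · exact absurd h.symm hc
        · exact h
      cases hs : pvSplitD d r with
      | nil => exact absurd hs (pvSplitD_ne_nil d r)
      | cons q qs =>
        rw [hs] at hp
        simp only [pvConsFirst] at hp
        rcases List.mem_cons.1 hp with h | h
        · subst h
          have : q.length < r.length := ih q hdr (by rw [hs]; exact List.mem_cons_self ..)
          simpa using this
        · exact Nat.lt_succ_of_lt (ih p hdr (by rw [hs]; exact List.mem_cons_of_mem _ h))

theorem pvStrip_length_le (cs : List Char) : (PySem.Chars.strip cs).length ≤ cs.length := by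
  have h1 : (PySem.Chars.lstrip cs).length ≤ cs.length := by
    simp [PySem.Chars.lstrip]
    exact List.length_dropWhile_le _ _
  have h2 : (PySem.Chars.rstrip (PySem.Chars.lstrip cs)).length ≤ (PySem.Chars.lstrip cs).length := by
    simp [PySem.Chars.rstrip]
    exact le_trans (List.length_dropWhile_le _ _) (by simp)
  exact le_trans h2 h1

theorem pvMem_of_isIn_singleton (d : Char) (t : List Char) (h : PySem.Chars.isIn [d] t = true) :
    d ∈ t := by
  have hinf : [d] <:+: t := (PySem.Chars.isIn_iff_infix [d] t).1 h
  exact hinf.sublist.subset (by simp)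

-- the module constant LOWERCASE_PARTICLES (a Python set of strings)
def LOWERCASE_PARTICLES : List (List Char) :=
  PySem.Set.ofList [['d','e'], ['d','e','l'], ['d','e','l','l','a'], ['d','i'], ['d','a'],
    ['d','o','s'], ['d','a','s'], ['v','a','n'], ['v','o','n'], ['d','e','r'], ['d','e','n'],
    ['l','a'], ['l','e']]

-- A's recursion, transliterated over List Char
def pvSmartGo (cs : List Char) : List Char :=
  let token := PySem.Chars.strip cs
  if token = [] then token
  else if h1 : PySem.Chars.isIn ['-'] token = true then
    PySem.Chars.join ['-'] ((PySem.Chars.splitOn token ['-']).attach.map (fun p => pvSmartGo p.1))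
  else if h2 : PySem.Chars.isIn ['\''] token = true then
    PySem.Chars.join ['\''] ((PySem.Chars.splitOn token ['\'']).attach.map (fun p => pvSmartGo p.1))
  else
    let lower := PySem.Chars.lower token
    if lower ∈ LOWERCASE_PARTICLES then lower
    else if PySem.Chars.startswith lower ['m','c'] && decide (token.length > 2) then
      ['M','c'] ++ PySem.Chars.upper (PySem.Chars.slice token (some 2) (some 3))
        ++ PySem.Chars.lower (PySem.Chars.slice token (some 3) none)
    else
      PySem.Chars.upper (PySem.Chars.slice token none (some 1))
        ++ PySem.Chars.lower (PySem.Chars.slice token (some 1) none)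
termination_by cs.length
decreasing_by
  · rename_i p
    obtain ⟨x, hx⟩ := p
    rw [pvSplitOn_eq_splitD] at hx
    have hd : '-' ∈ PySem.Chars.strip cs := pvMem_of_isIn_singleton _ _ h1
    exact lt_of_lt_of_le (pvLength_lt_of_mem_splitD _ _ _ hd hx) (pvStrip_length_le cs)
  · rename_i p
    obtain ⟨x, hx⟩ := p
    rw [pvSplitOn_eq_splitD] at hx
    have hd : '\'' ∈ PySem.Chars.strip cs := pvMem_of_isIn_singleton _ _ h2
    exact lt_of_lt_of_le (pvLength_lt_of_mem_splitD _ _ _ hd hx) (pvStrip_length_le cs)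

def smart_title_token (token : String) : String :=
  String.ofList (pvSmartGo token.toList)

-- ===== PORT B =====
-- B's _core helper: strip, particle, Mc, title-case for one delimiter-free segment
def pvCore (seg : List Char) : List Char :=
  let s := PySem.Chars.strip seg
  if s = [] then s
  else
    let lower := PySem.Chars.lower s
    if lower ∈ LOWERCASE_PARTICLES then lower
    else if PySem.Chars.startswith lower ['m','c'] && decide (s.length > 2) then
      ['M','c'] ++ PySem.Chars.upper (PySem.Chars.slice s (some 2) (some 3))
        ++ PySem.Chars.lower (PySem.Chars.slice s (some 3) none)
    else
      PySem.Chars.upper (PySem.Chars.slice s none (some 1))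
        ++ PySem.Chars.lower (PySem.Chars.slice s (some 1) none)

-- B's loop: out/cur accumulators, one pass over the characters
def pvBGo : List Char → List Char → List (List Char) → List (List Char)
  | [], cur, out => out ++ [pvCore cur]
  | c :: rest, cur, out =>
    if c = '-' ∨ c = '\'' then pvBGo rest [] (out ++ [pvCore cur, [c]])
    else pvBGo rest (cur ++ [c]) out

def smart_title_token_alt (token : String) : String :=
  String.ofList (PySem.Chars.join [] (pvBGo token.toList [] []))

-- ===== PRECONDITION & SPEC =====
def Spec_smart_title_token (token : String) (out : String) : Prop := out = smart_title_token_alt token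
instance (token : String) (out : String) : Decidable (Spec_smart_title_token token out) := by unfold Spec_smart_title_token; infer_instance

-- ===== CLAIM (what is proved, stated in full; the proofs are below) =====
def Claim_equal_smart_title_token : Prop := ∀ (token : String), Dom_smart_title_token token → Spec_smart_title_token token (smart_title_token token)

-- ===== LEMMAS AND PROOFS =====

def pvIsDelim (c : Char) : Bool := c = '-' || c = '\''

-- flat split keeping the delimiters as singleton pieces
def pvSplitKeep : List Char → List (List Char)
  | [] => [[]]
  | c :: r =>
    if pvIsDelim c then [] :: [c] :: pvSplitKeep r
    else match pvSplitKeep r with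
      | p :: ps => (c :: p) :: ps
      | [] => [[c]]

def pvG (p : List Char) : List Char := if p.any pvIsDelim then p else pvCore p

def pvF (x : List Char) : List Char := (List.map pvG (pvSplitKeep x)).flatten

-- interleave-and-flatten (flatten of intersperse, as one recursion)
def pvInterFlat (sep : List (List Char)) : List (List (List Char)) → List (List Char)
  | [] => []
  | [x] => x
  | x :: y :: xs => x ++ sep ++ pvInterFlat sep (y :: xs)

theorem pvSplitKeep_ne_nil (l : List Char) : pvSplitKeep l ≠ [] := by
  induction l with
  | nil => simp [pvSplitKeep]
  | cons c r ih =>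
    simp only [pvSplitKeep]
    split
    · simp
    · cases h : pvSplitKeep r with
      | nil => exact absurd h ih
      | cons p ps => simp

theorem pvSplitKeep_cons_delim (c : Char) (r : List Char) (hc : pvIsDelim c = true) :
    pvSplitKeep (c :: r) = [] :: [c] :: pvSplitKeep r := by
  simp [pvSplitKeep, hc]

theorem pvSplitKeep_cons_nondelim (c : Char) (r p : List Char) (ps : List (List Char))
    (hc : pvIsDelim c = false) (h : pvSplitKeep r = p :: ps) :
    pvSplitKeep (c :: r) = (c :: p) :: ps := by
  simp only [pvSplitKeep, hc, Bool.false_eq_true, if_false]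
  rw [h]

theorem pvSplitKeep_delimFree (l : List Char) (h : ∀ c ∈ l, pvIsDelim c = false) :
    pvSplitKeep l = [l] := by
  induction l with
  | nil => rfl
  | cons c r ih =>
    have hc : pvIsDelim c = false := h c (List.mem_cons_self ..)
    exact pvSplitKeep_cons_nondelim c r r [] hc
      (ih (fun x hx => h x (List.mem_cons_of_mem _ hx)))

-- head piece of pvSplitKeep is delimiter-free
theorem pvSplitKeep_head_free (l : List Char) (p : List Char) (ps : List (List Char))
    (h : pvSplitKeep l = p :: ps) : ∀ c ∈ p, pvIsDelim c = false := by
  induction l generalizing p ps with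
  | nil =>
    simp only [pvSplitKeep] at h
    injection h with h1 _
    subst h1; simp
  | cons c r ih =>
    by_cases hc : pvIsDelim c = true
    · rw [pvSplitKeep_cons_delim c r hc] at h
      injection h with h1 _
      subst h1; simp
    · have hc' : pvIsDelim c = false := by simpa using hc
      cases hsk : pvSplitKeep r with
      | nil => exact absurd hsk (pvSplitKeep_ne_nil r)
      | cons q qs =>
        rw [pvSplitKeep_cons_nondelim c r q qs hc' hsk] at h
        injection h with h1 _
        subst h1
        intro x hx
        rcases List.mem_cons.1 hx with rfl | hx
        · exact hc'
        · exact ih q qs hsk x hx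

-- last piece of pvSplitKeep is delimiter-free
theorem pvSplitKeep_last_free (l : List Char) (p : List Char)
    (h : (pvSplitKeep l).getLast? = some p) : ∀ c ∈ p, pvIsDelim c = false := by
  induction l generalizing p with
  | nil =>
    simp only [pvSplitKeep] at h
    simp only [List.getLast?_singleton, Option.some.injEq] at h
    subst h; simp
  | cons c r ih =>
    by_cases hc : pvIsDelim c = true
    · rw [pvSplitKeep_cons_delim c r hc] at h
      cases hsk : pvSplitKeep r with
      | nil => exact absurd hsk (pvSplitKeep_ne_nil r)
      | cons q qs =>
        rw [hsk, List.getLast?_cons_cons, List.getLast?_cons_cons] at h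
        exact ih p (by rw [hsk]; exact h)
    · have hc' : pvIsDelim c = false := by simpa using hc
      cases hsk : pvSplitKeep r with
      | nil => exact absurd hsk (pvSplitKeep_ne_nil r)
      | cons q qs =>
        rw [pvSplitKeep_cons_nondelim c r q qs hc' hsk] at h
        cases qs with
        | nil =>
          simp only [List.getLast?_singleton, Option.some.injEq] at h
          subst h
          intro x hx
          rcases List.mem_cons.1 hx with rfl | hx
          · exact hc'
          · exact ih q (by rw [hsk]; rfl) x hx
        | cons q1 qs1 =>
          rw [List.getLast?_cons_cons] at h
          exact ih p (by rw [hsk, List.getLast?_cons_cons]; exact h)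

-- B's loop computes the flat pieces
theorem pvSplitKeep_append_cons (cur : List Char) (c : Char) (r : List Char)
    (hcur : ∀ x ∈ cur, pvIsDelim x = false) (hc : pvIsDelim c = true) :
    pvSplitKeep (cur ++ c :: r) = cur :: [c] :: pvSplitKeep r := by
  induction cur with
  | nil => simpa using pvSplitKeep_cons_delim c r hc
  | cons a cur' ih =>
    have ha : pvIsDelim a = false := hcur a (List.mem_cons_self ..)
    have ih' := ih (fun x hx => hcur x (List.mem_cons_of_mem _ hx))
    rw [List.cons_append]
    exact pvSplitKeep_cons_nondelim a (cur' ++ c :: r) cur' ([c] :: pvSplitKeep r) ha ih'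

theorem pvAny_eq_false (l : List Char) (h : ∀ c ∈ l, pvIsDelim c = false) :
    l.any pvIsDelim = false := by
  rw [List.any_eq_false]
  intro x hx
  simp [h x hx]

theorem pvBGo_spec (cs cur : List Char) (out : List (List Char))
    (h : ∀ c ∈ cur, pvIsDelim c = false) :
    pvBGo cs cur out = out ++ List.map pvG (pvSplitKeep (cur ++ cs)) := by
  induction cs generalizing cur out with
  | nil =>
    simp only [pvBGo, List.append_nil]
    rw [pvSplitKeep_delimFree cur h]
    simp [pvG, pvAny_eq_false cur h]
  | cons c rest ih =>
    simp only [pvBGo]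
    by_cases hc : c = '-' ∨ c = '\''
    · rw [if_pos hc]
      have hd : pvIsDelim c = true := by
        rcases hc with rfl | rfl <;> rfl
      rw [ih [] _ (by simp)]
      rw [pvSplitKeep_append_cons cur c rest h hd]
      simp [pvG, pvAny_eq_false cur h, hd]
    · rw [if_neg hc]
      have hcf : pvIsDelim c = false := by
        simp only [pvIsDelim, Bool.or_eq_true, decide_eq_true_eq] at *
        simp [not_or] at hc
        simp [hc.1, hc.2]
      rw [ih (cur ++ [c]) out ?_]
      · rw [List.append_assoc, List.singleton_append]
      · intro x hx
        rcases List.mem_append.1 hx with hx | hx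
        · exact h x hx
        · rw [List.mem_singleton.1 hx]; exact hcf

theorem pvJoin_nil_eq_flatten (S : List (List Char)) : PySem.Chars.join [] S = S.flatten := by
  induction S with
  | nil => rfl
  | cons x S ih =>
    cases S with
    | nil => simp [PySem.Chars.join, List.intercalate, List.intersperse]
    | cons y T =>
      simp only [PySem.Chars.join, List.intercalate, List.intersperse] at *
      simp only [List.flatten_cons] at *
      rw [ih]
      simp

theorem pvIntercalate_cons₂ (sep x y : List Char) (l : List (List Char)) :
    List.intercalate sep (x :: y :: l) = x ++ sep ++ List.intercalate sep (y :: l) := by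
  simp [List.intercalate, List.intersperse]

theorem pvIntercalate_single (sep x : List Char) :
    List.intercalate sep [x] = x := by
  simp [List.intercalate, List.intersperse]

-- strip through leading/trailing whitespace
theorem pvStrip_cons_space (c : Char) (p : List Char) (h : PySem.Chars.isspace c = true) :
    PySem.Chars.strip (c :: p) = PySem.Chars.strip p := by
  simp [PySem.Chars.strip, PySem.Chars.lstrip, List.dropWhile_cons, h]

theorem pvRstrip_concat_space (c : Char) (p : List Char) (h : PySem.Chars.isspace c = true) :
    PySem.Chars.rstrip (p ++ [c]) = PySem.Chars.rstrip p := by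
  simp [PySem.Chars.rstrip, List.dropWhile_cons, h]

theorem pvStrip_concat_space (c : Char) (p : List Char) (h : PySem.Chars.isspace c = true) :
    PySem.Chars.strip (p ++ [c]) = PySem.Chars.strip p := by
  simp only [PySem.Chars.strip, PySem.Chars.lstrip]
  rw [List.dropWhile_append]
  by_cases he : (List.dropWhile PySem.Chars.isspace p).isEmpty
  · rw [if_pos he]
    simp only [List.isEmpty_iff] at he
    rw [he]
    simp [List.dropWhile_cons, h, PySem.Chars.rstrip]
  · rw [if_neg he]
    exact pvRstrip_concat_space c _ h

theorem pvDropWhile_idem (p : Char → Bool) (l : List Char) :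
    List.dropWhile p (List.dropWhile p l) = List.dropWhile p l := by
  induction l with
  | nil => rfl
  | cons a l ih =>
    rw [List.dropWhile_cons]
    by_cases h : p a
    · simp [h, ih]
    · simp [List.dropWhile_cons, h]

theorem pvRstrip_idem (y : List Char) :
    PySem.Chars.rstrip (PySem.Chars.rstrip y) = PySem.Chars.rstrip y := by
  simp [PySem.Chars.rstrip, pvDropWhile_idem]

theorem pvLstrip_rstrip (y : List Char) (hy : PySem.Chars.lstrip y = y) :
    PySem.Chars.lstrip (PySem.Chars.rstrip y) = PySem.Chars.rstrip y := by
  cases hz : PySem.Chars.rstrip y with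
  | nil => simp [PySem.Chars.lstrip]
  | cons a t =>
    have hpre : PySem.Chars.rstrip y <+: y := by
      have hsuf : List.dropWhile PySem.Chars.isspace y.reverse <:+ y.reverse :=
        List.dropWhile_suffix _
      have := List.reverse_prefix.2 hsuf
      simpa [PySem.Chars.rstrip] using this
    rw [hz] at hpre
    obtain ⟨u, hu⟩ := hpre
    have ha : PySem.Chars.isspace a = false := by
      by_contra hcon
      have ha' : PySem.Chars.isspace a = true := by simpa using hcon
      have hy2 : List.dropWhile PySem.Chars.isspace (t ++ u) = a :: (t ++ u) := by
        have hthis := hy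
        rw [← hu] at hthis
        simpa [PySem.Chars.lstrip, List.dropWhile_cons, ha'] using hthis
      have hle := List.length_dropWhile_le PySem.Chars.isspace (t ++ u)
      rw [hy2] at hle
      simp at hle
    simp [PySem.Chars.lstrip, List.dropWhile_cons, ha]

theorem pvStrip_idem (s : List Char) :
    PySem.Chars.strip (PySem.Chars.strip s) = PySem.Chars.strip s := by
  have h1 : PySem.Chars.lstrip (PySem.Chars.lstrip s) = PySem.Chars.lstrip s := by
    simp [PySem.Chars.lstrip, pvDropWhile_idem]
  calc PySem.Chars.strip (PySem.Chars.strip s)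
      = PySem.Chars.rstrip (PySem.Chars.lstrip (PySem.Chars.rstrip (PySem.Chars.lstrip s))) := rfl
    _ = PySem.Chars.rstrip (PySem.Chars.rstrip (PySem.Chars.lstrip s)) := by
        rw [pvLstrip_rstrip _ h1]
    _ = PySem.Chars.rstrip (PySem.Chars.lstrip s) := pvRstrip_idem _
    _ = PySem.Chars.strip s := rfl

-- pvCore ignores surrounding whitespace
theorem pvCore_cons_space (c : Char) (p : List Char) (h : PySem.Chars.isspace c = true) :
    pvCore (c :: p) = pvCore p := by
  simp only [pvCore, pvStrip_cons_space c p h]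

theorem pvCore_concat_space (c : Char) (p : List Char) (h : PySem.Chars.isspace c = true) :
    pvCore (p ++ [c]) = pvCore p := by
  simp only [pvCore, pvStrip_concat_space c p h]

theorem pvSpace_not_delim (c : Char) (h : PySem.Chars.isspace c = true) :
    pvIsDelim c = false := by
  have h1 : c ≠ '-' := by rintro rfl; exact absurd h (by decide)
  have h2 : c ≠ '\'' := by rintro rfl; exact absurd h (by decide)
  simp [pvIsDelim, h1, h2]

theorem pvF_cons_space (c : Char) (r : List Char) (h : PySem.Chars.isspace c = true) :
    pvF (c :: r) = pvF r := by
  have hc : pvIsDelim c = false := pvSpace_not_delim c h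
  cases hsk : pvSplitKeep r with
  | nil => exact absurd hsk (pvSplitKeep_ne_nil r)
  | cons p ps =>
    have hfree := pvSplitKeep_head_free r p ps hsk
    have hG : pvG (c :: p) = pvG p := by
      have h1 : (c :: p).any pvIsDelim = false :=
        pvAny_eq_false _ (by
          intro x hx
          rcases List.mem_cons.1 hx with rfl | hx
          · exact hc
          · exact hfree x hx)
      have h2 : p.any pvIsDelim = false := pvAny_eq_false _ hfree
      simp [pvG, h1, h2, pvCore_cons_space c p h]
    rw [pvF, pvSplitKeep_cons_nondelim c r p ps hc hsk, List.map_cons, List.flatten_cons,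
      hG, pvF, hsk, List.map_cons, List.flatten_cons]

theorem pvF_lstrip (x : List Char) : pvF (PySem.Chars.lstrip x) = pvF x := by
  induction x with
  | nil => rfl
  | cons c r ih =>
    by_cases h : PySem.Chars.isspace c = true
    · rw [show PySem.Chars.lstrip (c :: r) = PySem.Chars.lstrip r by
        simp [PySem.Chars.lstrip, List.dropWhile_cons, h], ih, pvF_cons_space c r h]
    · rw [show PySem.Chars.lstrip (c :: r) = c :: r by
        simp only [PySem.Chars.lstrip, List.dropWhile_cons]
        simp [h]]

-- appending one trailing character to the last piece
def pvAppendLast : List (List Char) → Char → List (List Char)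
  | [], c => [[c]]
  | [p], c => [p ++ [c]]
  | p :: q :: ps, c => p :: pvAppendLast (q :: ps) c

theorem pvSplitKeep_concat (c : Char) (hc : pvIsDelim c = false) (x : List Char) :
    pvSplitKeep (x ++ [c]) = pvAppendLast (pvSplitKeep x) c := by
  induction x with
  | nil =>
    simp only [List.nil_append]
    rw [pvSplitKeep_cons_nondelim c [] [] [] hc rfl]
    rfl
  | cons a r ih =>
    by_cases ha : pvIsDelim a = true
    · rw [List.cons_append, pvSplitKeep_cons_delim a _ ha, pvSplitKeep_cons_delim a r ha, ih]
      cases hsk : pvSplitKeep r with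
      | nil => exact absurd hsk (pvSplitKeep_ne_nil r)
      | cons q qs => rfl
    · have ha' : pvIsDelim a = false := by simpa using ha
      cases hsk : pvSplitKeep r with
      | nil => exact absurd hsk (pvSplitKeep_ne_nil r)
      | cons p ps =>
        have hcat : pvSplitKeep (r ++ [c]) = pvAppendLast (p :: ps) c := by rw [ih, hsk]
        cases ps with
        | nil =>
          have h2 : pvSplitKeep (r ++ [c]) = [p ++ [c]] := by rw [hcat]; rfl
          rw [List.cons_append,
            pvSplitKeep_cons_nondelim a (r ++ [c]) (p ++ [c]) [] ha' h2,
            pvSplitKeep_cons_nondelim a r p [] ha' hsk]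
          rfl
        | cons q qs =>
          have h2 : pvSplitKeep (r ++ [c]) = p :: pvAppendLast (q :: qs) c := by
            rw [hcat]; rfl
          rw [List.cons_append,
            pvSplitKeep_cons_nondelim a (r ++ [c]) p (pvAppendLast (q :: qs) c) ha' h2,
            pvSplitKeep_cons_nondelim a r p (q :: qs) ha' hsk]
          rfl

theorem pvMapG_appendLast (c : Char) (hsp : PySem.Chars.isspace c = true) :
    ∀ (L : List (List Char)) (p : List Char), L.getLast? = some p →
      (∀ x ∈ p, pvIsDelim x = false) →
      (List.map pvG (pvAppendLast L c)).flatten = (List.map pvG L).flatten := by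
  intro L
  induction L with
  | nil => intro p h; simp at h
  | cons a L ih =>
    intro p h hfree
    cases L with
    | nil =>
      have hpa : a = p := by simpa using h
      subst hpa
      have hc : pvIsDelim c = false := pvSpace_not_delim c hsp
      have h1 : (a ++ [c]).any pvIsDelim = false :=
        pvAny_eq_false _ (by
          intro x hx
          rcases List.mem_append.1 hx with hx | hx
          · exact hfree x hx
          · rw [List.mem_singleton.1 hx]; exact hc)
      have h2 : a.any pvIsDelim = false := pvAny_eq_false _ hfree
      show (List.map pvG [a ++ [c]]).flatten = (List.map pvG [a]).flatten
      simp only [List.map_cons, List.map_nil, List.flatten_cons, List.flatten_nil,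
        List.append_nil]
      simp only [pvG, h1, h2, Bool.false_eq_true, if_false]
      exact pvCore_concat_space c a hsp
    | cons b L' =>
      rw [List.getLast?_cons_cons] at h
      show (List.map pvG (a :: pvAppendLast (b :: L') c)).flatten = _
      simp only [List.map_cons, List.flatten_cons]
      rw [ih p h hfree]
      simp

theorem pvF_concat_space (c : Char) (x : List Char) (hsp : PySem.Chars.isspace c = true) :
    pvF (x ++ [c]) = pvF x := by
  have hc : pvIsDelim c = false := pvSpace_not_delim c hsp
  rw [pvF, pvSplitKeep_concat c hc x]
  cases hL : (pvSplitKeep x).getLast? with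
  | none =>
    rw [List.getLast?_eq_none_iff] at hL
    exact absurd hL (pvSplitKeep_ne_nil x)
  | some p =>
    rw [pvMapG_appendLast c hsp _ p hL (pvSplitKeep_last_free x p hL)]
    rfl

theorem pvF_rstrip (x : List Char) : pvF (PySem.Chars.rstrip x) = pvF x := by
  induction x using List.reverseRecOn with
  | nil => rfl
  | append_singleton ys c ih =>
    by_cases hsp : PySem.Chars.isspace c = true
    · rw [pvRstrip_concat_space c ys hsp, ih, pvF_concat_space c ys hsp]
    · rw [show PySem.Chars.rstrip (ys ++ [c]) = ys ++ [c] by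
        simp only [PySem.Chars.rstrip, List.reverse_append, List.reverse_cons,
          List.reverse_nil, List.nil_append, List.cons_append, List.nil_append,
          List.dropWhile_cons]
        simp [hsp]]

theorem pvF_strip (x : List Char) : pvF (PySem.Chars.strip x) = pvF x := by
  show pvF (PySem.Chars.rstrip (PySem.Chars.lstrip x)) = pvF x
  rw [pvF_rstrip, pvF_lstrip]

-- pvSplitKeep through a single-delimiter split
theorem pvSplitKeep_splitD (d : Char) (hd : pvIsDelim d = true) (t : List Char) :
    pvSplitKeep t = pvInterFlat [[d]] (List.map pvSplitKeep (pvSplitD d t)) := by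
  induction t with
  | nil => rfl
  | cons c r ih =>
    by_cases hc : c = d
    · have hcd : pvIsDelim c = true := by rw [hc]; exact hd
      rw [pvSplitKeep_cons_delim c r hcd]
      simp only [pvSplitD, if_pos hc]
      cases hS : pvSplitD d r with
      | nil => exact absurd hS (pvSplitD_ne_nil d r)
      | cons p ps =>
        rw [hS] at ih
        rw [List.map_cons, List.map_cons]
        show _ = pvSplitKeep [] ++ [[d]] ++ pvInterFlat [[d]] (pvSplitKeep p :: List.map pvSplitKeep ps)
        rw [← List.map_cons, ← ih, hc]
        rfl
    · by_cases hcD : pvIsDelim c = true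
      · rw [pvSplitKeep_cons_delim c r hcD]
        simp only [pvSplitD, if_neg hc]
        cases hS : pvSplitD d r with
        | nil => exact absurd hS (pvSplitD_ne_nil d r)
        | cons p ps =>
          rw [hS] at ih
          simp only [pvConsFirst, List.singleton_append, List.map_cons]
          rw [pvSplitKeep_cons_delim c p hcD]
          cases ps with
          | nil =>
            simp only [List.map_nil] at ih ⊢
            show [] :: [c] :: pvSplitKeep r = [] :: [c] :: pvSplitKeep p
            rw [ih]; rfl
          | cons q qs =>
            simp only [List.map_cons] at ih ⊢
            show [] :: [c] :: pvSplitKeep r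
              = (([] :: [c] :: pvSplitKeep p) ++ [[d]])
                ++ pvInterFlat [[d]] (pvSplitKeep q :: List.map pvSplitKeep qs)
            rw [ih]
            show _ = [] :: [c] :: ((pvSplitKeep p ++ [[d]])
              ++ pvInterFlat [[d]] (pvSplitKeep q :: List.map pvSplitKeep qs))
            rfl
      · have hc' : pvIsDelim c = false := by simpa using hcD
        simp only [pvSplitD, if_neg hc]
        cases hS : pvSplitD d r with
        | nil => exact absurd hS (pvSplitD_ne_nil d r)
        | cons p ps =>
          rw [hS] at ih
          simp only [pvConsFirst, List.singleton_append, List.map_cons]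
          cases hskp : pvSplitKeep p with
          | nil => exact absurd hskp (pvSplitKeep_ne_nil p)
          | cons q qs =>
            rw [pvSplitKeep_cons_nondelim c p q qs hc' hskp]
            cases ps with
            | nil =>
              simp only [List.map_nil] at ih ⊢
              show pvSplitKeep (c :: r) = (c :: q) :: qs
              have hr : pvSplitKeep r = q :: qs := by
                rw [ih]; show pvSplitKeep p = q :: qs; exact hskp
              exact pvSplitKeep_cons_nondelim c r q qs hc' hr
            | cons p1 ps1 =>
              simp only [List.map_cons] at ih ⊢
              have ihr : pvSplitKeep r
                  = (pvSplitKeep p ++ [[d]])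
                    ++ pvInterFlat [[d]] (pvSplitKeep p1 :: List.map pvSplitKeep ps1) := ih
              rw [hskp] at ihr
              have hr : pvSplitKeep r = q :: (qs ++ [[d]]
                  ++ pvInterFlat [[d]] (pvSplitKeep p1 :: List.map pvSplitKeep ps1)) := by
                rw [ihr]; simp
              rw [pvSplitKeep_cons_nondelim c r q _ hc' hr]
              show ((c :: q) :: qs ++ [[d]])
                  ++ pvInterFlat [[d]] (pvSplitKeep p1 :: List.map pvSplitKeep ps1)
                = (c :: q) :: (qs ++ [[d]]
                  ++ pvInterFlat [[d]] (pvSplitKeep p1 :: List.map pvSplitKeep ps1))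
              simp

theorem pvJoin_map_F (d : Char) (hd : pvIsDelim d = true) (S : List (List Char)) (hS : S ≠ []) :
    PySem.Chars.join [d] (List.map pvF S) =
      (List.map pvG (pvInterFlat [[d]] (List.map pvSplitKeep S))).flatten := by
  induction S with
  | nil => exact absurd rfl hS
  | cons x S ih =>
    cases S with
    | nil =>
      simp only [List.map_cons, List.map_nil]
      rw [show PySem.Chars.join [d] [pvF x] = pvF x from pvIntercalate_single [d] (pvF x)]
      rfl
    | cons y T =>
      simp only [List.map_cons]
      rw [show PySem.Chars.join [d] (pvF x :: pvF y :: List.map pvF T)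
          = pvF x ++ [d] ++ PySem.Chars.join [d] (pvF y :: List.map pvF T) from
        pvIntercalate_cons₂ [d] (pvF x) (pvF y) (List.map pvF T)]
      rw [show PySem.Chars.join [d] (pvF y :: List.map pvF T)
          = PySem.Chars.join [d] (List.map pvF (y :: T)) by rw [List.map_cons]]
      rw [ih (by simp)]
      show _ = (List.map pvG ((pvSplitKeep x ++ [[d]])
        ++ pvInterFlat [[d]] (pvSplitKeep y :: List.map pvSplitKeep T))).flatten
      have hGd : pvG [d] = [d] := by simp [pvG, hd]
      simp only [List.map_append, List.flatten_append, List.map_cons, List.map_nil,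
        List.flatten_cons, List.flatten_nil, hGd, List.map_cons]
      simp [pvF, List.append_assoc]

theorem pvIsIn_singleton_iff (d : Char) (t : List Char) :
    PySem.Chars.isIn [d] t = true ↔ d ∈ t := by
  constructor
  · exact pvMem_of_isIn_singleton d t
  · intro h
    rw [PySem.Chars.isIn_iff_infix]
    obtain ⟨s, u, rfl⟩ := List.append_of_mem h
    exact ⟨s, u, by simp⟩

-- master lemma: A's recursion computes the flat pass
theorem pvSmartGo_eq_F (cs : List Char) : pvSmartGo cs = pvF cs := by
  induction hn : cs.length using Nat.strong_induction_on generalizing cs with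
  | _ n ihn =>
  subst hn
  rw [pvSmartGo, ← pvF_strip cs]
  by_cases h0 : PySem.Chars.strip cs = []
  · rw [if_pos h0, h0]
    rfl
  · rw [if_neg h0]
    have hlen : (PySem.Chars.strip cs).length ≤ cs.length := pvStrip_length_le cs
    by_cases h1 : PySem.Chars.isIn ['-'] (PySem.Chars.strip cs) = true
    · rw [dif_pos h1]
      have hmem : '-' ∈ PySem.Chars.strip cs := (pvIsIn_singleton_iff _ _).1 h1
      have hmap : ((PySem.Chars.splitOn (PySem.Chars.strip cs) ['-']).attach.map
            (fun p => pvSmartGo p.1))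
          = (PySem.Chars.splitOn (PySem.Chars.strip cs) ['-']).map pvF := by
        refine Eq.trans (List.map_congr_left ?_) List.attach_map_val
        rintro ⟨x, hx⟩ -
        simp only
        rw [pvSplitOn_eq_splitD] at hx
        exact ihn x.length
          (lt_of_lt_of_le (pvLength_lt_of_mem_splitD '-' _ x hmem hx) hlen) x rfl
      rw [hmap, pvSplitOn_eq_splitD,
        pvJoin_map_F '-' rfl _ (pvSplitD_ne_nil _ _), ← pvSplitKeep_splitD '-' rfl]
      rfl
    · rw [dif_neg h1]
      by_cases h2 : PySem.Chars.isIn ['\''] (PySem.Chars.strip cs) = true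
      · rw [dif_pos h2]
        have hmem : '\'' ∈ PySem.Chars.strip cs := (pvIsIn_singleton_iff _ _).1 h2
        have hmap : ((PySem.Chars.splitOn (PySem.Chars.strip cs) ['\'']).attach.map
              (fun p => pvSmartGo p.1))
            = (PySem.Chars.splitOn (PySem.Chars.strip cs) ['\'']).map pvF := by
          refine Eq.trans (List.map_congr_left ?_) List.attach_map_val
          rintro ⟨x, hx⟩ -
          simp only
          rw [pvSplitOn_eq_splitD] at hx
          exact ihn x.length
            (lt_of_lt_of_le (pvLength_lt_of_mem_splitD '\'' _ x hmem hx) hlen) x rfl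
        rw [hmap, pvSplitOn_eq_splitD,
          pvJoin_map_F '\'' rfl _ (pvSplitD_ne_nil _ _), ← pvSplitKeep_splitD '\'' rfl]
        rfl
      · rw [dif_neg h2]
        have hfree : ∀ c ∈ PySem.Chars.strip cs, pvIsDelim c = false := by
          intro c hcmem
          by_contra hcon
          have hdel : pvIsDelim c = true := by simpa using hcon
          simp only [pvIsDelim, Bool.or_eq_true, decide_eq_true_eq] at hdel
          rcases hdel with rfl | rfl
          · exact h1 ((pvIsIn_singleton_iff _ _).2 hcmem)
          · exact h2 ((pvIsIn_singleton_iff _ _).2 hcmem)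
        rw [pvF, pvSplitKeep_delimFree _ hfree]
        have hany : (PySem.Chars.strip cs).any pvIsDelim = false := pvAny_eq_false _ hfree
        simp only [List.map_cons, List.map_nil, List.flatten_cons, List.flatten_nil,
          List.append_nil, pvG, hany, Bool.false_eq_true, if_false]
        rw [pvCore, pvStrip_idem cs, if_neg h0]

theorem pv_main (l : List Char) : pvSmartGo l = PySem.Chars.join [] (pvBGo l [] []) := by
  rw [pvBGo_spec l [] [] (by simp), pvJoin_nil_eq_flatten]
  simpa [pvF] using pvSmartGo_eq_F l

-- ===== VERDICT (by name: the statement is the Claim_ definition above) =====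
theorem smart_title_token_spec : Claim_equal_smart_title_token := by
  intro token _
  unfold Spec_smart_title_token smart_title_token smart_title_token_alt
  rw [pv_main]
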